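-- pv_equiv track=rewrite | github.com/suminb/coding-exercise | google/compression-decompression.py | tokenize
-- ===== SOURCE A (Python) =====
-- def tokenize(characters):
--     token_buf = []
--     for c in characters:
--         if c.isdigit():
--             token_buf.append(c)
--         elif c.islower():
--             token_buf.append(c)
--         elif c in '[]':
--             yield ''.join(token_buf)
--             token_buf = []
--             yield c
--         else:
--             raise ValueError(f'Invalid input: {c}')
--     if token_buf:
--         yield ''.join(token_buf)
-- ===== SOURCE B (Python) =====
-- import re
--
--
-- def tokenize(characters):
--     pieces = re.split(r'([\[\]])', characters)
--     if pieces[-1] == '':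
--         pieces = pieces[:-1]
--     for piece in pieces:
--         if piece == '[' or piece == ']':
--             yield piece
--         else:
--             for ch in piece:
--                 if not (ch.isdigit() or ch.islower()):
--                     raise ValueError(f'Invalid input: {ch}')
--             yield piece
-- ===== Notes on version B (the rewrite author's own statement) =====
-- stated objective: idiomatic
-- what changed: Replaces the per-character accumulator state machine with re.split on brackets followed by dropping a trailing empty piece and validating/emitting each piece.
-- outside the precondition, e.g. on tokenize('a!b'): A raises ValueError, B raises ValueError
import Mathlib
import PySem

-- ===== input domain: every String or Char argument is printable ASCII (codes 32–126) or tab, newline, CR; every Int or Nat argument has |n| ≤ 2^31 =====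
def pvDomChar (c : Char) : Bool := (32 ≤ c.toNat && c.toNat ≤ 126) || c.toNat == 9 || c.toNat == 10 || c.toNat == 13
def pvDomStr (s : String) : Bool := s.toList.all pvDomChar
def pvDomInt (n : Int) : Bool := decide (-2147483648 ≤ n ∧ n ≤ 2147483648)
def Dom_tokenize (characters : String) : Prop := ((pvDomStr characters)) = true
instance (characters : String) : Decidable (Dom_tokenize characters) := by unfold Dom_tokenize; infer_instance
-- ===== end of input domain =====

-- B replaces A's character-by-character accumulator state machine with split-on-brackets,
-- drop a trailing empty piece, then validate-and-emit each piece (objective: idiomatic).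


-- ===== PORT A =====
-- A's loop: state = (token_buf, yielded-so-far); on the invalid branch A raises ValueError,
-- which Pre_tokenize excludes (the port returns the output yielded so far there).
def tokenizeGoA : List Char → List Char → List String → List String
  | [], buf, out => out ++ (if buf.isEmpty then [] else [String.ofList buf])
  | c :: cs, buf, out =>
    if c.isDigit then tokenizeGoA cs (buf ++ [c]) out
    else if c.isLower then tokenizeGoA cs (buf ++ [c]) out
    else if c = '[' ∨ c = ']' then
      tokenizeGoA cs [] (out ++ [String.ofList buf, String.singleton c])
    else out

def tokenize (characters : String) : List String :=
  tokenizeGoA characters.toList [] []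

-- ===== PORT B =====
-- re.split(r'([\[\]])', s): alternating run-segments and bracket delimiters
def tokenizeSplit : List Char → List Char → List String
  | [], seg => [String.ofList seg]
  | c :: cs, seg =>
    if c = '[' ∨ c = ']' then String.ofList seg :: String.singleton c :: tokenizeSplit cs []
    else tokenizeSplit cs (seg ++ [c])

-- the piece loop: brackets pass through, runs are validated then emitted
-- (the raise, excluded by Pre_tokenize, becomes returning what was yielded so far)
def tokenizeEmit : List String → List String
  | [] => []
  | p :: ps =>
    if p = "[" ∨ p = "]" then p :: tokenizeEmit ps
    else if p.toList.all (fun c => c.isDigit || c.isLower) then p :: tokenizeEmit ps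
    else []

def tokenize_alt (characters : String) : List String :=
  let pieces := tokenizeSplit characters.toList []
  let pieces := if pieces.getLast? = some "" then pieces.dropLast else pieces
  tokenizeEmit pieces

-- ===== PRECONDITION & SPEC =====
-- Pre_ excludes exactly the inputs containing a character that is neither a digit, a
-- lowercase letter nor a bracket: on those both A and B raise ValueError.
def Pre_tokenize (characters : String) : Prop :=
  characters.toList.all (fun c => c.isDigit || c.isLower || c = '[' || c = ']') = true
instance (characters : String) : Decidable (Pre_tokenize characters) := by
  unfold Pre_tokenize; infer_instance
def pvWitness_tokenize : String := "a["

def Spec_tokenize (characters : String) (out : List String) : Prop := out = tokenize_alt characters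
instance (characters : String) (out : List String) : Decidable (Spec_tokenize characters out) := by unfold Spec_tokenize; infer_instance

-- ===== CLAIM (what is proved, stated in full; the proofs are below) =====
def Claim_equal_tokenize : Prop := ∀ (characters : String), Dom_tokenize characters → Pre_tokenize characters → Spec_tokenize characters (tokenize characters)

-- ===== LEMMAS AND PROOFS =====

-- recursive form of "drop the last piece iff it is the empty string"
def tokenizeDropT : List String → List String
  | [] => []
  | [p] => if p = "" then [] else [p]
  | p :: q :: ps => p :: tokenizeDropT (q :: ps)

theorem tokenizeDropT_eq (l : List String) :
    (if l.getLast? = some "" then l.dropLast else l) = tokenizeDropT l := by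
  induction l with
  | nil => simp [tokenizeDropT]
  | cons p ps ih =>
    cases ps with
    | nil => by_cases h : p = "" <;> simp [tokenizeDropT, h]
    | cons q qs =>
      rw [tokenizeDropT]
      rw [← ih]
      by_cases h : (q :: qs).getLast? = some "" <;>
        simp [List.getLast?_cons_cons, h]

theorem tokenizeSplit_ne_nil (cs : List Char) (seg : List Char) :
    tokenizeSplit cs seg ≠ [] := by
  cases cs with
  | nil => simp [tokenizeSplit]
  | cons c cs =>
    by_cases h : c = '[' ∨ c = ']'
    · simp [tokenizeSplit, h]
    · simp only [tokenizeSplit, if_neg h]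
      exact tokenizeSplit_ne_nil cs _

theorem mk_eq_empty_iff (buf : List Char) : (String.ofList buf = "") ↔ buf = [] := by
  simp

theorem emit_run (p : String) (ps : List String)
    (hp : p.toList.all (fun c => c.isDigit || c.isLower) = true) :
    tokenizeEmit (p :: ps) = p :: tokenizeEmit ps := by
  by_cases h : p = "[" ∨ p = "]"
  · simp [tokenizeEmit, h]
  · simp [tokenizeEmit, h, hp]

theorem goA_eq (cs : List Char) (buf : List Char) (out : List String)
    (hcs : ∀ c ∈ cs, (c.isDigit || c.isLower || c = '[' || c = ']') = true)
    (hbuf : (String.ofList buf).toList.all (fun c => c.isDigit || c.isLower) = true) :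
    tokenizeGoA cs buf out = out ++ tokenizeEmit (tokenizeDropT (tokenizeSplit cs buf)) := by
  induction cs generalizing buf out with
  | nil =>
    by_cases h : buf = []
    · subst h
      simp [tokenizeGoA, tokenizeSplit, tokenizeDropT, tokenizeEmit]
    · have hne : String.ofList buf ≠ "" := fun hc => h ((mk_eq_empty_iff buf).mp hc)
      simp only [tokenizeGoA, tokenizeSplit, tokenizeDropT, if_neg hne]
      rw [emit_run _ _ hbuf]
      simp [tokenizeEmit, h]
  | cons c cs ih =>
    have hc := hcs c (List.mem_cons_self ..)
    have hcs' : ∀ x ∈ cs, (x.isDigit || x.isLower || x = '[' || x = ']') = true :=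
      fun x hx => hcs x (List.mem_cons_of_mem _ hx)
    by_cases hd : c.isDigit
    · have hbuf' : (String.ofList (buf ++ [c])).toList.all
          (fun c => c.isDigit || c.isLower) = true := by
        simp at hbuf ⊢
        exact ⟨hbuf, Or.inl hd⟩
      have hnb : ¬ (c = '[' ∨ c = ']') := by
        rintro (rfl | rfl) <;> simp at hd
      simp only [tokenizeGoA, tokenizeSplit, if_pos hd, if_neg hnb]
      exact ih (buf ++ [c]) out hcs' hbuf'
    · by_cases hl : c.isLower
      · have hbuf' : (String.ofList (buf ++ [c])).toList.all
            (fun c => c.isDigit || c.isLower) = true := by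
          simp at hbuf ⊢
          exact ⟨hbuf, Or.inr hl⟩
        have hnb : ¬ (c = '[' ∨ c = ']') := by
          rintro (rfl | rfl) <;> simp at hl
        simp only [tokenizeGoA, tokenizeSplit, if_neg hd, if_pos hl, if_neg hnb]
        exact ih (buf ++ [c]) out hcs' hbuf'
      · have hb : c = '[' ∨ c = ']' := by
          simpa [hd, hl] using hc
        simp only [tokenizeGoA, tokenizeSplit, if_neg hd, if_neg hl, if_pos hb]
        rw [ih [] (out ++ [String.ofList buf, String.singleton c]) hcs' (by simp)]
        have hrest := tokenizeSplit_ne_nil cs []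
        obtain ⟨q, qs, hq⟩ := List.exists_cons_of_ne_nil hrest
        rw [hq, tokenizeDropT, tokenizeDropT]
        have hbr : String.singleton c = "[" ∨ String.singleton c = "]" := by
          rcases hb with rfl | rfl
          · exact Or.inl rfl
          · exact Or.inr rfl
        rw [emit_run _ _ hbuf]
        simp only [tokenizeEmit, if_pos hbr]
        simp

-- ===== VERDICT (by name: the statement is the Claim_ definition above) =====
theorem tokenize_spec : Claim_equal_tokenize := by
  intro characters _ hpre
  unfold Pre_tokenize at hpre
  rw [List.all_eq_true] at hpre
  unfold Spec_tokenize tokenize tokenize_alt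
  rw [goA_eq _ _ _ hpre (by simp)]
  show [] ++ tokenizeEmit (tokenizeDropT (tokenizeSplit characters.toList []))
      = tokenizeEmit (if (tokenizeSplit characters.toList []).getLast? = some ""
          then (tokenizeSplit characters.toList []).dropLast
          else (tokenizeSplit characters.toList []))
  rw [tokenizeDropT_eq]
  simp
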